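-- pv_equiv track=rewrite | github.com/Somesh-Salunkhe/Master_Thesis | Weak_Labeling_Using_BLIP2/src/blip2_har/visualization/timeline.py | labels_to_intervals
-- ===== SOURCE A (Python) =====
-- from typing import List, Tuple
--
-- def labels_to_intervals(labels: List[str]) -> List[Tuple[int, int, str]]:
--     if not labels: return []
--     intervals = []
--     start = 0
--     curr = labels[0]
--     for i in range(1, len(labels)):
--         if labels[i] != curr:
--             intervals.append((start, i, curr))
--             start = i
--             curr = labels[i]
--     intervals.append((start, len(labels), curr))
--     return intervals
-- ===== SOURCE B (Python) =====
-- def labels_to_intervals(labels):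
--     out = []
--     start = 0
--     n = len(labels)
--     while start < n:
--         x = labels[start]
--         end = start + 1
--         while end < n and labels[end] == x:
--             end += 1
--         out.append((start, end, x))
--         start = end
--     return out
-- ===== Notes on version B (the rewrite author's own statement) =====
-- stated objective: idiomatic
-- what changed: A scans indices 1..n-1 carrying (start, curr) state and emits an interval at each label change plus a trailing append; B is a two-pointer run scanner: for each group start it advances a second pointer past the maximal equal run and emits the interval immediately, with no carried state or post-loop append.
import Mathlib
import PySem

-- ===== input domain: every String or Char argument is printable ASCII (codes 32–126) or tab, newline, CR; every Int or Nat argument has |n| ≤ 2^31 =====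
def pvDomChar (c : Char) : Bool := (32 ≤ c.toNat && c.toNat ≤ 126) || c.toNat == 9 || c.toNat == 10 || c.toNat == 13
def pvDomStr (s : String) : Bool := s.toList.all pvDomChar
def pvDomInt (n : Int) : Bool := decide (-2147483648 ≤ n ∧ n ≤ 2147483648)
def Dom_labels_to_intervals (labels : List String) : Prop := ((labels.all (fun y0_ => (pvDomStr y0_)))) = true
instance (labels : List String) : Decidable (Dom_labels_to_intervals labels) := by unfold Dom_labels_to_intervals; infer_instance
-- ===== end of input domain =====

-- B replaces A's carried (start, curr) boundary-detection loop by a two-pointer run scanner (idiomatic; same O(n) cost).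


-- ===== PORT A =====
-- A's loop body: on index i, compare labels[i] with the carried current label
def stepA (labels : List String) (st : List (Int × Int × String) × Int × String) (i : Int) :
    List (Int × Int × String) × Int × String :=
  let x := PySem.List.pyGetD labels i ""
  if x ≠ st.2.2 then (st.1 ++ [(st.2.1, i, st.2.2)], i, x) else st

def labels_to_intervals (labels : List String) : List (Int × Int × String) :=
  match labels with
  | [] => []
  | l0 :: _ =>
    let st := (PySem.List.pyRange 1 (labels.length : Int) 1).foldl (stepA labels) ([], 0, l0)
    st.1 ++ [(st.2.1, (labels.length : Int), st.2.2)]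

-- ===== PORT B =====
-- outer loop of Source B: peel one maximal run off the front (the inner `while labels[end] == x` scan
-- is the takeWhile over the remaining list), emit its interval, continue after it
def altGo (start : Int) : List String → List (Int × Int × String)
  | [] => []
  | x :: rest =>
      let run := rest.takeWhile (fun y => y == x)
      let endIdx := start + 1 + (run.length : Int)
      (start, endIdx, x) :: altGo endIdx (rest.dropWhile (fun y => y == x))
termination_by xs => xs.length
decreasing_by
  have := List.length_dropWhile_le (p := fun y => y == x) (l := rest)
  simp; omega

def labels_to_intervals_alt (labels : List String) : List (Int × Int × String) :=
  altGo 0 labels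

-- ===== PRECONDITION & SPEC =====
def Spec_labels_to_intervals (labels : List String) (out : List (Int × Int × String)) : Prop := out = labels_to_intervals_alt labels
instance (labels : List String) (out : List (Int × Int × String)) : Decidable (Spec_labels_to_intervals labels out) := by unfold Spec_labels_to_intervals; infer_instance

-- ===== CLAIM (what is proved, stated in full; the proofs are below) =====
def Claim_equal_labels_to_intervals : Prop := ∀ (labels : List String), Dom_labels_to_intervals labels → Spec_labels_to_intervals labels (labels_to_intervals labels)

-- ===== LEMMAS AND PROOFS =====

-- The current group [start, a) carrying label curr, followed by the runs of xs starting at index a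
def altGoC (start a : Int) (curr : String) (xs : List String) : List (Int × Int × String) :=
  let t := xs.takeWhile (fun y => y == curr)
  (start, a + (t.length : Int), curr) :: altGo (a + (t.length : Int)) (xs.dropWhile (fun y => y == curr))

lemma altGo_cons (s : Int) (x : String) (xs : List String) :
    altGo s (x :: xs) = altGoC s (s + 1) x xs := by
  rw [altGo, altGoC]

lemma runFold_eq (labels : List String) :
    ∀ (xs : List String) (a : Int) (ivs : List (Int × Int × String)) (start : Int) (curr : String),
      0 ≤ a → a.toNat ≤ labels.length → labels.drop a.toNat = xs →
      ((PySem.List.pyRange a (labels.length : Int) 1).foldl (stepA labels) (ivs, start, curr)).1 ++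
        [(((PySem.List.pyRange a (labels.length : Int) 1).foldl (stepA labels) (ivs, start, curr)).2.1,
          (labels.length : Int),
          ((PySem.List.pyRange a (labels.length : Int) 1).foldl (stepA labels) (ivs, start, curr)).2.2)]
      = ivs ++ altGoC start a curr xs := by
  intro xs
  induction xs with
  | nil =>
    intro a ivs start curr h0 hle hdrop
    have hlen : labels.length ≤ a.toNat := by
      have := congrArg List.length hdrop
      simp at this; omega
    have ha : a = (labels.length : Int) := by omega
    rw [PySem.List.pyRange_one_eq_nil (le_of_eq ha.symm)]
    simp [altGoC, altGo, ha]
  | cons x xs' ih =>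
    intro a ivs start curr h0 hle hdrop
    have hlt : a.toNat < labels.length := by
      have := congrArg List.length hdrop
      simp at this; omega
    have haInt : a < (labels.length : Int) := by omega
    have hget : PySem.List.pyGetD labels a "" = x := by
      have h1 : labels[a.toNat]'hlt = x := by
        have : (labels.drop a.toNat)[0]'(by rw [hdrop]; simp) = x := by simp [hdrop]
        simpa using this
      rw [PySem.List.pyGetD_eq_getElem labels "" h0 (by exact_mod_cast haInt)]
      exact h1
    have hdrop' : labels.drop (a + 1).toNat = xs' := by
      have : (a + 1).toNat = a.toNat + 1 := by omega
      rw [this, ← List.drop_drop, hdrop]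
      simp
    rw [PySem.List.pyRange_one_cons haInt]
    simp only [List.foldl_cons]
    by_cases hx : x = curr
    · have hstep : stepA labels (ivs, start, curr) a = (ivs, start, curr) := by
        simp [stepA, hget, hx]
      rw [hstep, ih (a + 1) ivs start curr (by omega) (by omega) hdrop']
      subst hx
      simp only [altGoC, List.takeWhile_cons, List.dropWhile_cons, beq_self_eq_true, if_true,
        List.length_cons]
      push_cast
      have e : a + ((((List.takeWhile (fun y => y == x) xs').length : Int)) + 1)
             = a + 1 + (((List.takeWhile (fun y => y == x) xs').length : Int)) := by ring
      rw [e]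
    · have hstep : stepA labels (ivs, start, curr) a = (ivs ++ [(start, a, curr)], a, x) := by
        simp [stepA, hget, hx]
      rw [hstep, ih (a + 1) (ivs ++ [(start, a, curr)]) a x (by omega) (by omega) hdrop']
      have hxb : (x == curr) = false := by simp [hx]
      rw [← altGo_cons]
      simp only [altGoC, List.takeWhile_cons, List.dropWhile_cons, hxb]
      simp [altGo_cons, altGoC]

-- ===== VERDICT (by name: the statement is the Claim_ definition above) =====
theorem labels_to_intervals_spec : Claim_equal_labels_to_intervals := by
  intro labels _
  unfold Spec_labels_to_intervals labels_to_intervals_alt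
  cases labels with
  | nil => rw [altGo]; simp [labels_to_intervals]
  | cons l0 ls =>
    rw [altGo_cons]
    have h := runFold_eq (l0 :: ls) ls 1 [] 0 l0 (by omega) (by simp) (by simp)
    simp only [List.nil_append] at h
    have h01 : (0 : Int) + 1 = 1 := by norm_num
    rw [h01]
    exact h
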